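-- pv_equiv track=rewrite | github.com/SVCE-ACM/A-December-Of_Algorithms-2024 | December 12/python3_BawadharaniSree_Smart_Ticketing_System.py | process_ticket_requests
-- ===== SOURCE A (Python) =====
-- from collections import deque
--
-- def process_ticket_requests(N, requests):
--     queue = deque()
--     for request in requests:
--         parts = request.split()
--         name = parts[0]
--         tickets = int(parts[1])
--         is_vip = len(parts) == 3 and parts[2] == "VIP"
--         queue.append((name, tickets, is_vip))
--
--     result = []
--     vip_queue = deque()
--     regular_queue = deque()
--
--     while queue:
--         name, tickets, is_vip = queue.popleft()
--         if is_vip: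
--             vip_queue.append((name, tickets))
--         else:
--             regular_queue.append((name, tickets))
--
--     while N > 0 and (vip_queue or regular_queue):
--         if vip_queue:
--             name, tickets = vip_queue.popleft()
--         else:
--             name, tickets = regular_queue.popleft()
--
--         if tickets <= N:
--             N -= tickets
--             result.append(f"{name} purchased {tickets} tickets")
--         else:
--             result.append(f"{name} purchased {N} tickets")
--             N = 0
--
--     while vip_queue or regular_queue:
--         if vip_queue:
--             name, _ = vip_queue.popleft()
--         else:
--             name, _ = regular_queue.popleft()
--         result.append(f"{name} was not served")
--
--     return result
-- ===== SOURCE B (Python) =====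
-- def process_ticket_requests(N, requests):
--     parsed = [(p[0], int(p[1]), len(p) == 3 and p[2] == "VIP")
--               for p in (r.split() for r in requests)]
--     ordered = sorted(parsed, key=lambda t: 0 if t[2] else 1)
--     prefixes, pre = [], 0
--     for _, t, _ in ordered:
--         prefixes.append(pre)
--         pre += t
--     return [f"{name} purchased {min(t, N - pre)} tickets" if N - pre > 0
--             else f"{name} was not served"
--             for (name, t, _), pre in zip(ordered, prefixes)]
-- ===== Notes on version B (the rewrite author's own statement) =====
-- stated objective: alternative
-- what changed: Replaces A's deque partition and two sequential budget-mutating drain loops by a stable sort on a VIP key plus prefix sums, so each output line is a pure closed-form function min(tickets, N - prefix) of the input with no mutated budget, cap-to-zero step or served/unserved phase switch.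
import Mathlib
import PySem

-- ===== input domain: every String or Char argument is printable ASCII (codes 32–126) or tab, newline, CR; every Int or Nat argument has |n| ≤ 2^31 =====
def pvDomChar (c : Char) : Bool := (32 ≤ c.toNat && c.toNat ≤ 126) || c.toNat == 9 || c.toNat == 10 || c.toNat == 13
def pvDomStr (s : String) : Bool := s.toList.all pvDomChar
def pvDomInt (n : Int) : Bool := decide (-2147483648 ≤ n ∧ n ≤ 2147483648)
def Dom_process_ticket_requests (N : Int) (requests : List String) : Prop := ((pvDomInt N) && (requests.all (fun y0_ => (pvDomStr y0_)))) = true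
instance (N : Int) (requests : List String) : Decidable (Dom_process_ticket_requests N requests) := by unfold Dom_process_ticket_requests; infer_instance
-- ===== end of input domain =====

-- B replaces A's deque partition and two budget-mutating drain loops by a stable sort on a
-- VIP key, prefix sums, and one pure map where each line is min(tickets, N - prefix);
-- objective: alternative (same task, genuinely different mechanism).

-- ===== PORT A =====
-- parse one request: parts[0], int(parts[1]), len(parts)==3 and parts[2]=="VIP"
def pvParseA (request : String) : String × Int × Bool :=
  let parts := PySem.Str.split₀ request
  let name := parts.getD 0 ""
  let tickets := (PySem.Int.ofStr? (parts.getD 1 "")).getD 0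
  let is_vip := parts.length == 3 && parts.getD 2 "" == "VIP"
  (name, tickets, is_vip)

-- the second while loop: drain vip_queue first, then regular_queue, appending "was not served"
def pvUnservedReg : List (String × Int) → List String
  | [] => []
  | (name, _) :: rq => (name ++ " was not served") :: pvUnservedReg rq

def pvUnservedA : List (String × Int) → List (String × Int) → List String
  | [], rq => pvUnservedReg rq
  | (name, _) :: vq, rq => (name ++ " was not served") :: pvUnservedA vq rq

-- the first while loop (N > 0 and a queue nonempty); when it exits, the unserved loop runs
def pvServeA (n : Int) (vq rq : List (String × Int)) : List String :=
  if n > 0 then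
    match vq, rq with
    | [], [] => []
    | (name, tickets) :: vq', rq' =>
        if tickets ≤ n then
          (name ++ " purchased " ++ PySem.Int.toStr tickets ++ " tickets") :: pvServeA (n - tickets) vq' rq'
        else
          (name ++ " purchased " ++ PySem.Int.toStr n ++ " tickets") :: pvServeA 0 vq' rq'
    | [], (name, tickets) :: rq' =>
        if tickets ≤ n then
          (name ++ " purchased " ++ PySem.Int.toStr tickets ++ " tickets") :: pvServeA (n - tickets) [] rq'
        else
          (name ++ " purchased " ++ PySem.Int.toStr n ++ " tickets") :: pvServeA 0 [] rq'
  else pvUnservedA vq rq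
termination_by vq.length + rq.length

def process_ticket_requests (N : Int) (requests : List String) : List String :=
  let queue := requests.foldl (fun q r => q ++ [pvParseA r]) []
  let qs := queue.foldl
      (fun (p : List (String × Int) × List (String × Int)) t =>
        if t.2.2 then (p.1 ++ [(t.1, t.2.1)], p.2) else (p.1, p.2 ++ [(t.1, t.2.1)]))
      ([], [])
  pvServeA N qs.1 qs.2

-- ===== PORT B =====
def pvParseB (r : String) : String × Int × Bool :=
  let p := PySem.Str.split₀ r
  (p.getD 0 "", (PySem.Int.ofStr? (p.getD 1 "")).getD 0, p.length == 3 && p.getD 2 "" == "VIP")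

def process_ticket_requests_alt (N : Int) (requests : List String) : List String :=
  let parsed := requests.map pvParseB
  -- sorted(parsed, key=lambda t: 0 if t[2] else 1) — stable sort on the VIP key
  let ordered := PySem.List.sorted parsed (fun t => if t.2.2 then (0 : Int) else 1)
  -- prefixes: running sums of ticket counts, one per item (pre before the item)
  let pp := ordered.foldl (fun (s : Int × List Int) t => (s.1 + t.2.1, s.2 ++ [s.1])) (0, [])
  (ordered.zip pp.2).map (fun q =>
    if N - q.2 > 0 then
      q.1.1 ++ " purchased " ++ PySem.Int.toStr (min q.1.2.1 (N - q.2)) ++ " tickets"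
    else q.1.1 ++ " was not served")

-- ===== PRECONDITION & SPEC =====
-- Pre_ excludes (a) inputs where Python A raises: a request with fewer than two whitespace-
-- separated parts (IndexError) or whose second part is not int()-parsable (ValueError); and
-- (b) negative ticket counts, which lie outside the task's natural domain (a purchase request
-- for a negative number of tickets), where A's resumed-budget behaviour is an artefact.
def Pre_process_ticket_requests (N : Int) (requests : List String) : Prop :=
  ∀ r ∈ requests, 2 ≤ (PySem.Str.split₀ r).length ∧
    (PySem.Int.ofStr? ((PySem.Str.split₀ r).getD 1 "")).isSome ∧
    0 ≤ (PySem.Int.ofStr? ((PySem.Str.split₀ r).getD 1 "")).getD 0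
instance (N : Int) (requests : List String) : Decidable (Pre_process_ticket_requests N requests) := by
  unfold Pre_process_ticket_requests; infer_instance

def pvWitness_process_ticket_requests : Int × List String :=
  (5, ["alice 3 VIP", "bob 4", "carol 2 VIP"])

def Spec_process_ticket_requests (N : Int) (requests : List String) (out : List String) : Prop := out = process_ticket_requests_alt N requests
instance (N : Int) (requests : List String) (out : List String) : Decidable (Spec_process_ticket_requests N requests out) := by unfold Spec_process_ticket_requests; infer_instance

-- ===== CLAIM (what is proved, stated in full; the proofs are below) =====
def Claim_equal_process_ticket_requests : Prop := ∀ (N : Int) (requests : List String), Dom_process_ticket_requests N requests → Pre_process_ticket_requests N requests → Spec_process_ticket_requests N requests (process_ticket_requests N requests)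

-- ===== LEMMAS AND PROOFS =====

theorem pvParse_eq (r : String) : pvParseA r = pvParseB r := rfl

def pvStrip (t : String × Int × Bool) : String × Int := (t.1, t.2.1)

-- A's partition fold produces (VIPs, regulars) in input order
theorem pvPartition_foldl (l : List (String × Int × Bool))
    (v0 r0 : List (String × Int)) :
    l.foldl
      (fun (p : List (String × Int) × List (String × Int)) t =>
        if t.2.2 then (p.1 ++ [(t.1, t.2.1)], p.2) else (p.1, p.2 ++ [(t.1, t.2.1)]))
      (v0, r0)
    = (v0 ++ (l.filter (fun t => t.2.2)).map pvStrip,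
       r0 ++ (l.filter (fun t => !t.2.2)).map pvStrip) := by
  induction l generalizing v0 r0 with
  | nil => simp
  | cons t l ih =>
      by_cases h : t.2.2
      · simp [List.foldl_cons, h, ih, pvStrip]
      · simp [List.foldl_cons, h, ih, pvStrip]

-- inserting a VIP (key 0) lands after all VIPs, before all regulars (stability)
theorem pvInsertV (x : String × Int × Bool) (hx : x.2.2 = true)
    (zs os : List (String × Int × Bool))
    (hz : ∀ z ∈ zs, z.2.2 = true) (ho : ∀ o ∈ os, o.2.2 = false) :
    PySem.List.insertBy
      (fun a b => decide ((if a.2.2 then (0 : Int) else 1) < (if b.2.2 then (0 : Int) else 1)))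
      x (zs ++ os) = zs ++ x :: os := by
  induction zs with
  | nil =>
      cases os with
      | nil => rfl
      | cons o os' =>
          have := ho o (by simp)
          simp [PySem.List.insertBy, hx, this]
  | cons z zs ih =>
      have hzz := hz z (by simp)
      simp only [List.cons_append, PySem.List.insertBy, hx, hzz]
      simp only [decide_eq_true_eq, if_pos]
      simp [ih (fun a ha => hz a (by simp [ha]))]

-- inserting a regular (key 1) always goes to the end
theorem pvInsertR (x : String × Int × Bool) (hx : x.2.2 = false)
    (l : List (String × Int × Bool)) :
    PySem.List.insertBy
      (fun a b => decide ((if a.2.2 then (0 : Int) else 1) < (if b.2.2 then (0 : Int) else 1)))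
      x l = l ++ [x] := by
  apply PySem.List.insertBy_of_forall_not_before
  intro y _
  by_cases hy : y.2.2 <;> simp [hx, hy]

-- the stable sort on the VIP key is the stable partition
theorem pvSortFold (l zs os : List (String × Int × Bool))
    (hz : ∀ z ∈ zs, z.2.2 = true) (ho : ∀ o ∈ os, o.2.2 = false) :
    l.foldl
      (fun acc x => PySem.List.insertBy
        (fun a b => decide ((if a.2.2 then (0 : Int) else 1) < (if b.2.2 then (0 : Int) else 1)))
        x acc) (zs ++ os)
    = (zs ++ l.filter (fun t => t.2.2)) ++ (os ++ l.filter (fun t => !t.2.2)) := by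
  induction l generalizing zs os with
  | nil => simp
  | cons t l ih =>
      by_cases h : t.2.2
      · rw [List.foldl_cons, pvInsertV t h zs os hz ho]
        have : zs ++ t :: os = (zs ++ [t]) ++ os := by simp
        rw [this, ih (zs ++ [t]) os
          (by intro a ha; rcases List.mem_append.mp ha with h1 | h1
              · exact hz a h1
              · simp at h1; subst h1; exact h) ho]
        simp [h]
      · rw [List.foldl_cons, pvInsertR t (by simpa using h)]
        have : (zs ++ os) ++ [t] = zs ++ (os ++ [t]) := by simp
        rw [this, ih zs (os ++ [t]) hz
          (by intro a ha; rcases List.mem_append.mp ha with h1 | h1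
              · exact ho a h1
              · simp at h1; subst h1; simpa using h)]
        simp [h]

theorem pvSorted_partition (l : List (String × Int × Bool)) :
    PySem.List.sorted l (fun t => if t.2.2 then (0 : Int) else 1)
    = l.filter (fun t => t.2.2) ++ l.filter (fun t => !t.2.2) := by
  rw [PySem.List.sorted_eq_foldl_insertBy]
  simpa using pvSortFold l [] [] (by simp) (by simp)

-- the prefix-sum list B builds
def pvPrefList (p0 : Int) : List (String × Int × Bool) → List Int
  | [] => []
  | t :: l => p0 :: pvPrefList (p0 + t.2.1) l

theorem pvFoldPref (l : List (String × Int × Bool)) (p0 : Int) (acc : List Int) :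
    (l.foldl (fun (s : Int × List Int) t => (s.1 + t.2.1, s.2 ++ [s.1])) (p0, acc)).2
    = acc ++ pvPrefList p0 l := by
  induction l generalizing p0 acc with
  | nil => simp [pvPrefList]
  | cons t l ih => simp [List.foldl_cons, ih, pvPrefList]

-- the zip-with-prefixes map, written as a budget recursion (n = N - p0)
def pvPassC (n : Int) : List (String × Int × Bool) → List String
  | [] => []
  | t :: l =>
      (if n > 0 then t.1 ++ " purchased " ++ PySem.Int.toStr (min t.2.1 n) ++ " tickets"
       else t.1 ++ " was not served") :: pvPassC (n - t.2.1) l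

theorem pvZipMap (N : Int) (l : List (String × Int × Bool)) (p0 : Int) :
    ((l.zip (pvPrefList p0 l)).map (fun q =>
      if N - q.2 > 0 then
        q.1.1 ++ " purchased " ++ PySem.Int.toStr (min q.1.2.1 (N - q.2)) ++ " tickets"
      else q.1.1 ++ " was not served"))
    = pvPassC (N - p0) l := by
  induction l generalizing p0 with
  | nil => simp [pvPrefList, pvPassC]
  | cons t l ih =>
      simp only [pvPrefList, List.zip_cons_cons, List.map_cons, pvPassC]
      congr 1
      have : N - p0 - t.2.1 = N - (p0 + t.2.1) := by ring
      rw [this, ih]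

theorem pvUnservedA_eq (vq rq : List (String × Int)) :
    pvUnservedA vq rq = (vq ++ rq).map (fun t => t.1 ++ " was not served") := by
  induction vq with
  | nil =>
      induction rq with
      | nil => rfl
      | cons t rq ih => obtain ⟨name, k⟩ := t; simp [pvUnservedA, pvUnservedReg] at ih ⊢; exact ih
  | cons t vq ih => obtain ⟨name, k⟩ := t; simp [pvUnservedA, ih]

theorem pvPassC_nonpos (n : Int) (h : n ≤ 0) (l : List (String × Int × Bool))
    (hl : ∀ t ∈ l, 0 ≤ t.2.1) :
    pvPassC n l = l.map (fun t => t.1 ++ " was not served") := by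
  induction l generalizing n with
  | nil => rfl
  | cons t l ih =>
      have ht := hl t (by simp)
      have : ¬ n > 0 := by omega
      simp [pvPassC, this, ih (n - t.2.1) (by omega) (fun a ha => hl a (by simp [ha]))]

theorem pvServe_pass_nil (l2 : List (String × Int × Bool)) (n : Int)
    (h2 : ∀ t ∈ l2, 0 ≤ t.2.1) :
    pvServeA n [] (l2.map pvStrip) = pvPassC n l2 := by
  induction l2 generalizing n with
  | nil =>
      by_cases h : n > 0
      · simp [pvServeA.eq_def, h, pvPassC]
      · simp [pvServeA.eq_def, h, pvPassC, pvUnservedA]; rfl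
  | cons t l2 ih =>
      obtain ⟨name, tickets, v⟩ := t
      have ht : (0 : Int) ≤ tickets := h2 (name, tickets, v) (by simp)
      have h2' : ∀ t ∈ l2, 0 ≤ t.2.1 := fun a ha => h2 a (by simp [ha])
      by_cases h : n > 0
      · rw [pvServeA.eq_def]
        simp only [h, if_true]
        by_cases hle : tickets ≤ n
        · have : min tickets n = tickets := min_eq_left hle
          simp [pvStrip, pvPassC, h, hle, ih _ h2']
        · have hm : min tickets n = n := min_eq_right (by omega)
          have lhs0 : pvServeA 0 [] (l2.map pvStrip) = pvPassC 0 l2 := ih 0 h2'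
          rw [pvPassC_nonpos 0 (by omega) l2 h2'] at lhs0
          simp [pvPassC, h, hle, hm, pvStrip, pvPassC_nonpos (n - tickets) (by omega) l2 h2', lhs0]
      · rw [pvServeA.eq_def]
        simp only [h, if_false]
        rw [pvUnservedA_eq, pvPassC_nonpos n (by omega) _ h2]
        simp [pvStrip, Function.comp_def]

theorem pvServe_pass (l1 l2 : List (String × Int × Bool)) (n : Int)
    (h1 : ∀ t ∈ l1, 0 ≤ t.2.1) (h2 : ∀ t ∈ l2, 0 ≤ t.2.1) :
    pvServeA n (l1.map pvStrip) (l2.map pvStrip) = pvPassC n (l1 ++ l2) := by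
  induction l1 generalizing n with
  | nil => simpa using pvServe_pass_nil l2 n h2
  | cons t l1 ih =>
      obtain ⟨name, tickets, v⟩ := t
      have ht : (0 : Int) ≤ tickets := h1 (name, tickets, v) (by simp)
      have h1' : ∀ t ∈ l1, 0 ≤ t.2.1 := fun a ha => h1 a (by simp [ha])
      have h12 : ∀ t ∈ l1 ++ l2, 0 ≤ t.2.1 := by
        intro a ha; rcases List.mem_append.mp ha with h' | h'
        · exact h1' a h'
        · exact h2 a h'
      by_cases h : n > 0
      · rw [pvServeA.eq_def]
        simp only [h, if_true]
        by_cases hle : tickets ≤ n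
        · have : min tickets n = tickets := min_eq_left hle
          simp [pvStrip, pvPassC, h, hle, ih _ h1']
        · have hm : min tickets n = n := min_eq_right (by omega)
          have lhs0 := ih 0 h1'
          rw [pvPassC_nonpos 0 (by omega) _ h12] at lhs0
          simp [pvPassC, h, hle, hm, pvStrip, pvPassC_nonpos (n - tickets) (by omega) _ h12, lhs0]
      · rw [pvServeA.eq_def]
        simp only [h, if_false]
        have hAll : ∀ t ∈ (name, tickets, v) :: (l1 ++ l2), 0 ≤ t.2.1 := by
          intro a ha
          rcases List.mem_cons.mp ha with h' | h'
          · subst h'; exact ht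
          · rcases List.mem_append.mp h' with h'' | h''
            · exact h1' a h''
            · exact h2 a h''
        rw [pvUnservedA_eq, show (name, tickets, v) :: l1 ++ l2 = (name, tickets, v) :: (l1 ++ l2) from rfl,
          pvPassC_nonpos n (by omega) _ hAll]
        simp [pvStrip, Function.comp_def]

-- ===== VERDICT (by name: the statement is the Claim_ definition above) =====
theorem process_ticket_requests_spec : Claim_equal_process_ticket_requests := by
  intro N requests _ hpre
  show process_ticket_requests N requests = process_ticket_requests_alt N requests
  unfold process_ticket_requests process_ticket_requests_alt
  have hnn : ∀ t ∈ requests.map pvParseB, 0 ≤ t.2.1 := by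
    intro t ht
    rcases List.mem_map.mp ht with ⟨r, hr, rfl⟩
    obtain ⟨-, hs, hnn⟩ := hpre r hr
    simpa [pvParseB] using hnn
  simp only [PySem.List.foldl_append_singleton_eq_map, pvPartition_foldl, List.nil_append,
    pvParse_eq, pvSorted_partition, pvFoldPref, pvZipMap]
  have hsub : N - 0 = N := by ring
  rw [hsub]
  exact pvServe_pass _ _ N
    (fun a ha => hnn a (List.mem_of_mem_filter ha))
    (fun a ha => hnn a (List.mem_of_mem_filter ha))
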